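-- pv_equiv track=rewrite | github.com/mmm-da/archive | 2020/digital_auto/course-work/source/calculator_TCA (2).py | isPair
-- ===== SOURCE A (Python) =====
-- def isPair(a, b):
--     k = 0   #количество отличий
--     n = -1  #номер бита отличия
--     for i in range(len(a)):
--         if (a[i] == 2 and b[i] != 2) or (a[i] != 2 and b[i] == 2): # если вектора не совпадают по форме
--             return -1
--         if a[i] != b[i]:
--             k += 1
--             n = i
--     return (n if k == 1 else -1)
--
-- k = 1
-- ===== SOURCE B (Python) =====
-- def isPair(a, b):
--     # find the first differing position (a form mismatch is always a value difference,
--     # since exactly one side being 2 makes the values unequal)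
--     d = next((i for i in range(len(a)) if a[i] != b[i]), None)
--     if d is None:
--         return -1
--     if (a[d] == 2) != (b[d] == 2):
--         return -1
--     # exactly-one-difference check: any further difference (including any later
--     # form mismatch, which is itself a difference) means the answer is -1
--     return -1 if any(a[i] != b[i] for i in range(d + 1, len(a))) else d
-- ===== Notes on version B (the rewrite author's own statement) =====
-- stated objective: alternative
-- what changed: Instead of A's single loop with a difference counter plus an explicit form-mismatch check, B locates the first differing index, rejects it if it is a form mismatch, and otherwise returns it iff no later index differs, using the fact that any form mismatch is itself a value difference so no separate form scan is needed.
-- outside the precondition, e.g. on isPair([0, 1], [0]): A raises IndexError, B raises IndexError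
import Mathlib
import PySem

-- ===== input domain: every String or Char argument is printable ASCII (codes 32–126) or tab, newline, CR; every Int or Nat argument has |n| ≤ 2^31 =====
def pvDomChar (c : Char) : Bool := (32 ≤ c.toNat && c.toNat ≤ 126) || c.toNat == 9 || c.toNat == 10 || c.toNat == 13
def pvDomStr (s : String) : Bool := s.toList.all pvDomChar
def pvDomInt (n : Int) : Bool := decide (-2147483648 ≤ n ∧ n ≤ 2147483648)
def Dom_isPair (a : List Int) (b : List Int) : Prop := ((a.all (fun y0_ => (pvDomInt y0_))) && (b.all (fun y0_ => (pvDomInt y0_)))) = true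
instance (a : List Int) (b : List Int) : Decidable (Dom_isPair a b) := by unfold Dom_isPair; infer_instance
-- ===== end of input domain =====

-- B replaces A's single counter-loop (interleaved form check + k/n counters) by a first-difference
-- search: return the first differing index iff it is not a form mismatch and nothing later differs
-- (a form mismatch is always a value difference); same cost, no counters, no full form scan.


-- ===== PORT A =====
-- A's 'for i in range(len(a))' loop: m counts the remaining iterations (started at a.length),
-- i is the current index. b[i] is ported as b.getD i 0: under Pre_isPair every index the loop
-- actually reaches is in range for b (out-of-range b[i] is Python's IndexError, excluded by
-- Pre_isPair), so getD is exact there.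
def isPairLoop (a b : List Int) (m i : Nat) (k n : Int) : Int :=
  match m with
  | 0 => if k = 1 then n else -1
  | Nat.succ m' =>
    if (a.getD i 0 = 2 ∧ b.getD i 0 ≠ 2) ∨ (a.getD i 0 ≠ 2 ∧ b.getD i 0 = 2) then -1
    else if a.getD i 0 ≠ b.getD i 0 then isPairLoop a b m' (i + 1) (k + 1) (Int.ofNat i)
    else isPairLoop a b m' (i + 1) k n

def isPair (a : List Int) (b : List Int) : Int := isPairLoop a b a.length 0 0 (-1)

-- ===== PORT B =====
-- Source B's 'next((i for i in range(len(a)) if a[i] != b[i]), None)'; m = remaining iterations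
def altFirstDiff (a b : List Int) (m i : Nat) : Option Nat :=
  match m with
  | 0 => none
  | Nat.succ m' => if a.getD i 0 ≠ b.getD i 0 then some i else altFirstDiff a b m' (i + 1)

-- Source B's 'any(a[i] != b[i] for i in range(d + 1, len(a)))'; m = remaining iterations
def altAnyDiff (a b : List Int) (m i : Nat) : Bool :=
  match m with
  | 0 => false
  | Nat.succ m' => if a.getD i 0 ≠ b.getD i 0 then true else altAnyDiff a b m' (i + 1)

def isPair_alt (a : List Int) (b : List Int) : Int :=
  match altFirstDiff a b a.length 0 with
  | none => -1
  | some d =>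
    if decide (a.getD d 0 = 2) ≠ decide (b.getD d 0 = 2) then -1
    else if altAnyDiff a b (a.length - (d + 1)) (d + 1) then -1 else Int.ofNat d

-- ===== PRECONDITION & SPEC =====
-- Pre_ excludes exactly the inputs on which A (and B) raise IndexError: b shorter than a with no
-- form mismatch within b's range, so the loop reads b past its end.
def Pre_isPair (a : List Int) (b : List Int) : Prop :=
  a.length ≤ b.length ∨ ∃ j < b.length, (a.getD j 0 = 2) ≠ (b.getD j 0 = 2)
instance (a : List Int) (b : List Int) : Decidable (Pre_isPair a b) := by unfold Pre_isPair; infer_instance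

def pvWitness_isPair : List Int × List Int := ([2, 0, 1], [2, 1, 1])

def Spec_isPair (a : List Int) (b : List Int) (out : Int) : Prop := out = isPair_alt a b
instance (a : List Int) (b : List Int) (out : Int) : Decidable (Spec_isPair a b out) := by unfold Spec_isPair; infer_instance

-- ===== CLAIM (what is proved, stated in full; the proofs are below) =====
def Claim_equal_isPair : Prop := ∀ (a : List Int) (b : List Int), Dom_isPair a b → Pre_isPair a b → Spec_isPair a b (isPair a b)

-- ===== LEMMAS AND PROOFS =====

-- proof helpers: the list of differing indices (fuel m, from index i on), a form-mismatch scan,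
-- and the 'last difference index or default' that A's n register tracks
def diffsFrom (a b : List Int) (m i : Nat) : List Nat :=
  match m with
  | 0 => []
  | Nat.succ m' =>
    if a.getD i 0 ≠ b.getD i 0 then i :: diffsFrom a b m' (i + 1) else diffsFrom a b m' (i + 1)

def formFrom (a b : List Int) (m i : Nat) : Bool :=
  match m with
  | 0 => false
  | Nat.succ m' =>
    if decide (a.getD i 0 = 2) ≠ decide (b.getD i 0 = 2) then true else formFrom a b m' (i + 1)

def lastIdx (n : Int) (ds : List Nat) : Int :=
  match ds.getLast? with
  | some j => Int.ofNat j
  | none => n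

theorem lastIdx_cons : ∀ (ds : List Nat) (n : Int) (j : Nat),
    lastIdx n (j :: ds) = lastIdx (Int.ofNat j) ds
  | [], n, j => by simp [lastIdx]
  | x :: xs, n, j => by
    simp only [lastIdx, List.getLast?_cons_cons]
    rcases h : (x :: xs).getLast? with _ | y
    · exact absurd h (by simp)
    · rfl

-- A's loop computes -1 on a form mismatch, else 'exactly one diff → its (last = only) index'
theorem loop_eq (a b : List Int) : ∀ m i (k n : Int),
    isPairLoop a b m i k n =
      if formFrom a b m i then -1
      else if k + (diffsFrom a b m i).length = 1 then lastIdx n (diffsFrom a b m i) else -1 := by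
  intro m
  induction m with
  | zero =>
    intro i k n
    by_cases hk : k = 1 <;> simp [isPairLoop, formFrom, diffsFrom, hk, lastIdx]
  | succ m ih =>
    intro i k n
    rw [isPairLoop, formFrom, diffsFrom]
    by_cases h1 : a.getD i 0 = 2 <;> by_cases h2 : b.getD i 0 = 2
    · rw [if_neg (by tauto), if_neg (show ¬ a.getD i 0 ≠ b.getD i 0 by rw [h1, h2]; simp),
          if_neg (show ¬ (decide (a.getD i 0 = 2) ≠ decide (b.getD i 0 = 2)) by simp only [ne_eq, decide_eq_decide, not_not]; tauto),
          if_neg (show ¬ a.getD i 0 ≠ b.getD i 0 by rw [h1, h2]; simp)]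
      exact ih (i + 1) k n
    · rw [if_pos (by tauto),
          if_pos (show (decide (a.getD i 0 = 2) ≠ decide (b.getD i 0 = 2)) by simp only [ne_eq, decide_eq_decide]; tauto)]
      simp
    · rw [if_pos (by tauto),
          if_pos (show (decide (a.getD i 0 = 2) ≠ decide (b.getD i 0 = 2)) by simp only [ne_eq, decide_eq_decide]; tauto)]
      simp
    · rw [if_neg (by tauto),
          if_neg (show ¬ (decide (a.getD i 0 = 2) ≠ decide (b.getD i 0 = 2)) by simp only [ne_eq, decide_eq_decide, not_not]; tauto)]
      by_cases hd : a.getD i 0 ≠ b.getD i 0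
      · rw [if_pos hd, if_pos hd, ih (i + 1) (k + 1) (Int.ofNat i)]
        by_cases hA : formFrom a b m (i + 1)
        · simp [hA]
        · rw [if_neg hA, if_neg hA, lastIdx_cons]
          have : (k + 1 + ((diffsFrom a b m (i + 1)).length : Int) = 1) ↔
              (k + (((i :: diffsFrom a b m (i + 1)).length : Nat) : Int) = 1) := by
            simp only [List.length_cons]
            push_cast
            omega
          by_cases hl : k + 1 + ((diffsFrom a b m (i + 1)).length : Int) = 1
          · rw [if_pos hl, if_pos (this.mp hl)]
          · rw [if_neg hl, if_neg (fun hc => hl (this.mpr hc))]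
      · rw [if_neg hd, if_neg hd]
        exact ih (i + 1) k n

-- a found first difference splits the diff list: head d, tail = diffs with the remaining fuel
theorem firstDiff_split (a b : List Int) : ∀ m i d, altFirstDiff a b m i = some d →
    i ≤ d ∧ diffsFrom a b m i = d :: diffsFrom a b (m - (d + 1 - i)) (d + 1) := by
  intro m
  induction m with
  | zero => intro i d h; exact absurd h (by simp [altFirstDiff])
  | succ m ih =>
    intro i d h
    rw [altFirstDiff] at h
    rw [diffsFrom]
    by_cases hd : a.getD i 0 ≠ b.getD i 0
    · rw [if_pos hd] at h
      have hid : i = d := Option.some.inj h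
      subst hid
      rw [if_pos hd]
      refine ⟨le_refl i, ?_⟩
      have : m + 1 - (i + 1 - i) = m := by omega
      rw [this]
    · rw [if_neg hd] at h
      obtain ⟨hle, heq⟩ := ih (i + 1) d h
      rw [if_neg hd, heq]
      refine ⟨by omega, ?_⟩
      have : m + 1 - (d + 1 - i) = m - (d + 1 - (i + 1)) := by omega
      rw [this]

theorem firstDiff_none (a b : List Int) : ∀ m i, altFirstDiff a b m i = none →
    diffsFrom a b m i = [] := by
  intro m
  induction m with
  | zero => intro i _; rw [diffsFrom]
  | succ m ih =>
    intro i h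
    rw [altFirstDiff] at h
    rw [diffsFrom]
    by_cases hd : a.getD i 0 ≠ b.getD i 0
    · rw [if_pos hd] at h; exact absurd h (by simp)
    · rw [if_neg hd] at h
      rw [if_neg hd]
      exact ih (i + 1) h

theorem anyDiff_iff (a b : List Int) : ∀ m i,
    (altAnyDiff a b m i = true ↔ diffsFrom a b m i ≠ []) := by
  intro m
  induction m with
  | zero => intro i; simp [altAnyDiff, diffsFrom]
  | succ m ih =>
    intro i
    rw [altAnyDiff, diffsFrom]
    by_cases hd : a.getD i 0 ≠ b.getD i 0
    · rw [if_pos hd, if_pos hd]; simp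
    · rw [if_neg hd, if_neg hd]; exact ih (i + 1)

-- every position witnessing a form mismatch is a differing position
theorem form_mem (a b : List Int) : ∀ m i, formFrom a b m i = true →
    ∃ j ∈ diffsFrom a b m i, (decide (a.getD j 0 = 2) ≠ decide (b.getD j 0 = 2)) := by
  intro m
  induction m with
  | zero => intro i h; exact absurd h (by simp [formFrom])
  | succ m ih =>
    intro i hf
    rw [formFrom] at hf
    rw [diffsFrom]
    by_cases hm : (decide (a.getD i 0 = 2) ≠ decide (b.getD i 0 = 2))
    · have hd : a.getD i 0 ≠ b.getD i 0 := by
        intro he; rw [he] at hm; exact hm rfl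
      exact ⟨i, by rw [if_pos hd]; simp, hm⟩
    · rw [if_neg hm] at hf
      obtain ⟨j, hj, hjm⟩ := ih (i + 1) hf
      by_cases hd : a.getD i 0 ≠ b.getD i 0
      · exact ⟨j, by rw [if_pos hd]; exact List.mem_cons_of_mem _ hj, hjm⟩
      · exact ⟨j, by rw [if_neg hd]; exact hj, hjm⟩

theorem form_false (a b : List Int) : ∀ m i, formFrom a b m i = false →
    ∀ j ∈ diffsFrom a b m i, ¬ (decide (a.getD j 0 = 2) ≠ decide (b.getD j 0 = 2)) := by
  intro m
  induction m with
  | zero => intro i _ j hj; exact absurd hj (by simp [diffsFrom])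
  | succ m ih =>
    intro i hf j hj
    rw [formFrom] at hf
    rw [diffsFrom] at hj
    by_cases hm : (decide (a.getD i 0 = 2) ≠ decide (b.getD i 0 = 2))
    · rw [if_pos hm] at hf; exact absurd hf (by simp)
    · rw [if_neg hm] at hf
      by_cases hd : a.getD i 0 ≠ b.getD i 0
      · rw [if_pos hd] at hj
        rcases List.mem_cons.mp hj with he | hj'
        · rw [he]; exact hm
        · exact ih (i + 1) hf j hj'
      · rw [if_neg hd] at hj
        exact ih (i + 1) hf j hj

theorem main_eq (a b : List Int) : isPair a b = isPair_alt a b := by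
  unfold isPair isPair_alt
  rw [loop_eq a b a.length 0 0 (-1)]
  rcases hfd : altFirstDiff a b a.length 0 with _ | d
  · -- no differing position: no form mismatch possible, both sides -1
    have hnil : diffsFrom a b a.length 0 = [] := firstDiff_none a b a.length 0 hfd
    have hf : formFrom a b a.length 0 = false := by
      by_contra hc
      obtain ⟨j, hj, _⟩ := form_mem a b a.length 0 (by revert hc; cases formFrom a b a.length 0 <;> simp)
      rw [hnil] at hj; exact absurd hj (by simp)
    simp [hf, hnil]
  · obtain ⟨-, hds⟩ := firstDiff_split a b a.length 0 d hfd
    have hfuel : a.length - (d + 1 - 0) = a.length - (d + 1) := by omega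
    rw [hfuel] at hds
    dsimp only
    by_cases hf : formFrom a b a.length 0 = true
    · -- A returns -1; show B does too
      rw [if_pos hf]
      obtain ⟨j, hj, hjm⟩ := form_mem a b a.length 0 hf
      rw [hds] at hj
      by_cases hdm : (decide (a.getD d 0 = 2) ≠ decide (b.getD d 0 = 2))
      · rw [if_pos hdm]
      · rw [if_neg hdm]
        have hjr : j ∈ diffsFrom a b (a.length - (d + 1)) (d + 1) := by
          rcases List.mem_cons.mp hj with he | hj'
          · rw [he] at hjm; exact absurd hjm hdm
          · exact hj'
        have hany : altAnyDiff a b (a.length - (d + 1)) (d + 1) = true := by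
          rw [anyDiff_iff]
          intro he; rw [he] at hjr; exact absurd hjr (by simp)
        rw [hany]
        simp
    · -- no form mismatch anywhere: B's form check at d fails, everything hinges on the tail
      have hf' : formFrom a b a.length 0 = false := by revert hf; cases formFrom a b a.length 0 <;> simp
      rw [if_neg hf]
      have hdm : ¬ (decide (a.getD d 0 = 2) ≠ decide (b.getD d 0 = 2)) :=
        form_false a b a.length 0 hf' d (by rw [hds]; simp)
      rw [if_neg hdm, hds]
      rcases hr : diffsFrom a b (a.length - (d + 1)) (d + 1) with _ | ⟨r, rs⟩
      · -- exactly one difference: both return d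
        have hany : altAnyDiff a b (a.length - (d + 1)) (d + 1) = false := by
          have h2 := anyDiff_iff a b (a.length - (d + 1)) (d + 1)
          rw [hr] at h2
          revert h2; cases altAnyDiff a b (a.length - (d + 1)) (d + 1) <;> simp
        rw [hany]
        simp [lastIdx]
      · -- two or more differences: both return -1
        have hany : altAnyDiff a b (a.length - (d + 1)) (d + 1) = true := by
          rw [anyDiff_iff, hr]
          simp
        have hlen : ¬ ((0 : Int) + (((d :: r :: rs).length : Nat) : Int) = 1) := by
          simp only [List.length_cons]; push_cast; omega
        rw [if_neg hlen, hany]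
        simp

-- ===== VERDICT (by name: the statement is the Claim_ definition above) =====
theorem isPair_spec : Claim_equal_isPair := by
  intro a b _ _
  exact main_eq a b
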